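-- pv_equiv track=rewrite | github.com/rbaron/catprinter | catprinter/cmds.py | encode_run_length_repetition
-- ===== SOURCE A (Python) =====
-- def encode_run_length_repetition(n, val):
--     res = []
--     while n > 0x7f:
--         res.append(0x7f | (val << 7))
--         n -= 0x7f
--     if n > 0:
--         res.append((val << 7) | n)
--     return res
-- ===== SOURCE B (Python) =====
-- def encode_run_length_repetition(n, val):
--     if n <= 0:
--         return []
--     q, r = divmod(n, 0x7f)
--     res = [0x7f | (val << 7)] * q
--     if r > 0:
--         res.append((val << 7) | r)
--     return res
-- ===== Notes on version B (the rewrite author's own statement) =====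
-- stated objective: idiomatic
-- what changed: Replaced the subtract-127-per-iteration while loop with a closed form: divmod(n, 0x7f) gives the number of full chunks (list replication) and the trailing remainder byte.
import Mathlib
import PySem

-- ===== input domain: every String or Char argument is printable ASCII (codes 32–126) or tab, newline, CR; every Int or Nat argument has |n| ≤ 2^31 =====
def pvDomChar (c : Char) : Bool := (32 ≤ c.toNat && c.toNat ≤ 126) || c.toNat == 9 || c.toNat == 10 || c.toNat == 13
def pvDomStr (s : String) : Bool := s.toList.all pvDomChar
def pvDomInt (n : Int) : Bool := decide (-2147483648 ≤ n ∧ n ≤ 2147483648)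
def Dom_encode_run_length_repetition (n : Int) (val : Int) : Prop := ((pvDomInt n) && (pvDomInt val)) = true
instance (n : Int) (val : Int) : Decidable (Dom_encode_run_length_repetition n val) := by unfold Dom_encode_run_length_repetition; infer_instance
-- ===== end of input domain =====

-- B replaces the subtract-127 while-loop by a divmod closed form (replicate full chunks + remainder byte); idiomatic.


-- ===== PORT A =====
-- the while loop of A, carried with its accumulator `res`
def pvErlLoop (n : Int) (val : Int) (res : List Int) : List Int :=
  if n > 127 then
    pvErlLoop (n - 127) val (res ++ [PySem.Int.bor 127 (val <<< 7)])
  else if n > 0 then res ++ [PySem.Int.bor (val <<< 7) n]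
  else res
termination_by n.toNat
decreasing_by omega

def encode_run_length_repetition (n : Int) (val : Int) : List Int :=
  pvErlLoop n val []

-- ===== PORT B =====
def encode_run_length_repetition_alt (n : Int) (val : Int) : List Int :=
  if n ≤ 0 then []
  else
    let q := PySem.Int.floordiv n 127
    let r := PySem.Int.mod n 127
    List.replicate q.toNat (PySem.Int.bor 127 (val <<< 7)) ++
      (if r > 0 then [PySem.Int.bor (val <<< 7) r] else [])

-- ===== PRECONDITION & SPEC =====
def Spec_encode_run_length_repetition (n : Int) (val : Int) (out : List Int) : Prop := out = encode_run_length_repetition_alt n val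
instance (n : Int) (val : Int) (out : List Int) : Decidable (Spec_encode_run_length_repetition n val out) := by unfold Spec_encode_run_length_repetition; infer_instance

-- ===== CLAIM (what is proved, stated in full; the proofs are below) =====
def Claim_equal_encode_run_length_repetition : Prop := ∀ (n : Int) (val : Int), Dom_encode_run_length_repetition n val → Spec_encode_run_length_repetition n val (encode_run_length_repetition n val)

-- ===== LEMMAS AND PROOFS =====

-- B satisfies A's loop recurrence: peel one full chunk when n > 127
lemma alt_step (n val : Int) (h : n > 127) :
    encode_run_length_repetition_alt n val =
      PySem.Int.bor 127 (val <<< 7) :: encode_run_length_repetition_alt (n - 127) val := by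
  unfold encode_run_length_repetition_alt
  rw [PySem.Int.floordiv_eq_ediv_of_pos (a := n) (by norm_num),
      PySem.Int.mod_eq_emod_of_pos (a := n) (by norm_num),
      PySem.Int.floordiv_eq_ediv_of_pos (a := n - 127) (by norm_num),
      PySem.Int.mod_eq_emod_of_pos (a := n - 127) (by norm_num)]
  have h1 : ¬ n ≤ 0 := by omega
  have h2 : ¬ n - 127 ≤ 0 ∨ n - 127 ≤ 0 := by omega
  simp only [h1, if_false]
  have hq : (n / 127).toNat = (((n - 127) / 127)).toNat + 1 := by omega
  have hr : n % 127 = (n - 127) % 127 := by omega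
  rcases h2 with h2 | h2
  · simp only [h2, if_false, hq, hr, List.replicate_succ, List.cons_append]
  · omega  -- n - 127 ≤ 0 contradicts h : n > 127

lemma alt_base (n val : Int) (h : ¬ n > 127) :
    encode_run_length_repetition_alt n val =
      if n > 0 then [PySem.Int.bor (val <<< 7) n] else [] := by
  unfold encode_run_length_repetition_alt
  rw [PySem.Int.floordiv_eq_ediv_of_pos (a := n) (by norm_num),
      PySem.Int.mod_eq_emod_of_pos (a := n) (by norm_num)]
  by_cases hp : n > 0
  · have h1 : ¬ n ≤ 0 := by omega
    simp only [h1, if_false, hp, if_true]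
    by_cases h127 : n = 127
    · subst h127
      norm_num
      rw [PySem.Int.bor_comm]
    · have hq : (n / 127).toNat = 0 := by omega
      have hr : n % 127 = n := by omega
      simp [hq, hr, hp]
  · simp [show n ≤ 0 by omega, hp]

lemma loop_eq (n val : Int) (res : List Int) :
    pvErlLoop n val res = res ++ encode_run_length_repetition_alt n val := by
  by_cases h : n > 127
  · rw [pvErlLoop, if_pos h, loop_eq (n - 127) val, alt_step n val h]
    simp
  · rw [pvErlLoop, if_neg h, alt_base n val h]
    by_cases hp : n > 0 <;> simp [hp]
termination_by n.toNat
decreasing_by omega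

-- ===== VERDICT (by name: the statement is the Claim_ definition above) =====
theorem encode_run_length_repetition_spec : Claim_equal_encode_run_length_repetition := by
  intro n val _
  unfold Spec_encode_run_length_repetition encode_run_length_repetition
  simpa using loop_eq n val []
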